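-- pv_equiv track=rewrite | github.com/Andriy-Sydorenko/leadzai_test_task | pagination.py | generate_pagination
-- ===== SOURCE A (Python) =====
-- def generate_pagination(current_page, total_pages, boundaries, around):
--     if current_page < 1 or current_page > total_pages or total_pages < 1 or boundaries < 0 or around < 0:
--         return "Invalid input"
--     pages = []
--
--     # Determine the first and last page numbers to be displayed based on boundaries
--     start_pages = list(range(1, min(boundaries, total_pages) + 1))
--     end_pages = list(range(max(total_pages - boundaries + 1, boundaries + 1), total_pages + 1))
--
--     # Determine the pages around the current page
--     around_pages = list(range(max(current_page - around, min(boundaries + 1, total_pages)),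
--                               min(current_page + around + 1, total_pages + 1)))
--
--     # Combine the page ranges, ensuring no duplicates and in order
--     all_pages = sorted(set(start_pages + around_pages + end_pages))
--
--     # Construct the pagination string with ellipses where there are gaps in the page sequence
--     for i in range(len(all_pages)):
--         # Add the current page number
--         pages.append(str(all_pages[i]))
--
--         # Check if we need to add ellipses
--         if i < len(all_pages) - 1:
--             if all_pages[i + 1] - all_pages[i] > 1:
--                 pages.append("...")
--
--     return ' '.join(pages)
-- ===== SOURCE B (Python) =====
-- def _merge(xs, ys):
--     # linear merge of two sorted duplicate-free lists, dropping duplicates across them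
--     out = []
--     i = j = 0
--     while i < len(xs) and j < len(ys):
--         if xs[i] < ys[j]:
--             out.append(xs[i]); i += 1
--         elif ys[j] < xs[i]:
--             out.append(ys[j]); j += 1
--         else:
--             out.append(xs[i]); i += 1; j += 1
--     out += xs[i:]
--     out += ys[j:]
--     return out
--
-- def generate_pagination(current_page, total_pages, boundaries, around):
--     if current_page < 1 or current_page > total_pages or total_pages < 1 or boundaries < 0 or around < 0:
--         return "Invalid input"
--     start_pages = list(range(1, min(boundaries, total_pages) + 1))
--     end_pages = list(range(max(total_pages - boundaries + 1, boundaries + 1), total_pages + 1))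
--     around_pages = list(range(max(current_page - around, min(boundaries + 1, total_pages)),
--                               min(current_page + around + 1, total_pages + 1)))
--     pages = _merge(_merge(start_pages, around_pages), end_pages)
--     parts = []
--     prev = 0
--     for p in pages:
--         if parts and p - prev > 1:
--             parts.append("...")
--         parts.append(str(p))
--         prev = p
--     return ' '.join(parts)
-- ===== Notes on version B (the rewrite author's own statement) =====
-- stated objective: alternative
-- what changed: Replaces A's set-union of the three range lists followed by sorting and an index-with-lookahead output loop by a linear two-pointer merge (with cross-duplicate dropping) of the three already-sorted ranges and a single emission pass that tracks the previously shown page to insert ellipses.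
import Mathlib
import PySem

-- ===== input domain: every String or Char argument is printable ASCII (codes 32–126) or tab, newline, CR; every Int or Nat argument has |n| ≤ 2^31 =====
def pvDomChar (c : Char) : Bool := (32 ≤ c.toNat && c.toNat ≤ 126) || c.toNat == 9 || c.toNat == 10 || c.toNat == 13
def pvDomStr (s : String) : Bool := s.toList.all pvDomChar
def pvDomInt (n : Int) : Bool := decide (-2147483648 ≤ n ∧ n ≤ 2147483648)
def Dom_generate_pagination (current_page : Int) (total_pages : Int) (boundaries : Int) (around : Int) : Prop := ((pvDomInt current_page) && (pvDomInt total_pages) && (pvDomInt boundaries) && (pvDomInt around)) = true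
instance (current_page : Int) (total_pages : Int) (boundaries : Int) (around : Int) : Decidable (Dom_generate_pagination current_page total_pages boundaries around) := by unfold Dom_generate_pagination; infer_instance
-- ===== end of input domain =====

-- B replaces A's set-union + sort + index-lookahead loop by a linear three-way merge of the
-- already-sorted ranges and a previous-page-tracking emission scan (objective: alternative).

-- ===== PORT A =====
-- A's output loop: for i in range(len(all_pages)): append str(p); if next - cur > 1 append "..."
-- as the obvious structural recursion with lookahead (the i+1 access is guarded in A).
def pagesLoopA : List Int → List String
  | [] => []
  | [x] => [PySem.Int.toStr x]
  | x :: y :: rest =>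
      PySem.Int.toStr x ::
        (if y - x > 1 then "..." :: pagesLoopA (y :: rest) else pagesLoopA (y :: rest))

def generate_pagination (current_page : Int) (total_pages : Int) (boundaries : Int) (around : Int) : String :=
  if current_page < 1 || current_page > total_pages || total_pages < 1 || boundaries < 0 || around < 0 then
    "Invalid input"
  else
    let start_pages := PySem.List.pyRange 1 (min boundaries total_pages + 1) 1
    let end_pages := PySem.List.pyRange (max (total_pages - boundaries + 1) (boundaries + 1)) (total_pages + 1) 1
    let around_pages := PySem.List.pyRange (max (current_page - around) (min (boundaries + 1) total_pages))
                          (min (current_page + around + 1) (total_pages + 1)) 1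
    let all_pages := PySem.List.sorted (PySem.Set.ofList (start_pages ++ around_pages ++ end_pages)) (fun x => x) false
    PySem.Str.join " " (pagesLoopA all_pages)

-- ===== PORT B =====
-- two-pointer merge of two sorted duplicate-free lists, dropping cross-duplicates
-- (the obvious structural recursion over the same two-cursor state as Source B's while loop)
def mergeU : List Int → List Int → List Int
  | [], ys => ys
  | x :: xs, [] => x :: xs
  | x :: xs, y :: ys =>
    if x < y then x :: mergeU xs (y :: ys)
    else if y < x then y :: mergeU (x :: xs) ys
    else x :: mergeU xs ys
termination_by xs ys => xs.length + ys.length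

def generate_pagination_alt (current_page : Int) (total_pages : Int) (boundaries : Int) (around : Int) : String :=
  if current_page < 1 || current_page > total_pages || total_pages < 1 || boundaries < 0 || around < 0 then
    "Invalid input"
  else
    let start_pages := PySem.List.pyRange 1 (min boundaries total_pages + 1) 1
    let end_pages := PySem.List.pyRange (max (total_pages - boundaries + 1) (boundaries + 1)) (total_pages + 1) 1
    let around_pages := PySem.List.pyRange (max (current_page - around) (min (boundaries + 1) total_pages))
                          (min (current_page + around + 1) (total_pages + 1)) 1
    let pages := mergeU (mergeU start_pages around_pages) end_pages
    let res := pages.foldl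
      (fun (st : List String × Int) (p : Int) =>
        (st.1 ++ (if st.1 ≠ [] ∧ p - st.2 > 1 then ["..."] else []) ++ [PySem.Int.toStr p], p))
      ([], 0)
    PySem.Str.join " " res.1

-- ===== PRECONDITION & SPEC =====
def Spec_generate_pagination (current_page : Int) (total_pages : Int) (boundaries : Int) (around : Int) (out : String) : Prop := out = generate_pagination_alt current_page total_pages boundaries around
instance (current_page : Int) (total_pages : Int) (boundaries : Int) (around : Int) (out : String) : Decidable (Spec_generate_pagination current_page total_pages boundaries around out) := by unfold Spec_generate_pagination; infer_instance

-- ===== CLAIM (what is proved, stated in full; the proofs are below) =====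
def Claim_equal_generate_pagination : Prop := ∀ (current_page : Int) (total_pages : Int) (boundaries : Int) (around : Int), Dom_generate_pagination current_page total_pages boundaries around → Spec_generate_pagination current_page total_pages boundaries around (generate_pagination current_page total_pages boundaries around)

-- ===== LEMMAS AND PROOFS =====

-- proof-side token stream: tokens emitted for list L when the previously shown page is `prev`
def tokB (prev : Int) : List Int → List String
  | [] => []
  | x :: rest => (if x - prev > 1 then ["..."] else []) ++ [PySem.Int.toStr x] ++ tokB x rest

-- A's lookahead loop emits exactly the prev-tracking token stream
theorem pagesLoopA_eq_tokB (L : List Int) :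
    pagesLoopA L = match L with | [] => [] | x :: rest => PySem.Int.toStr x :: tokB x rest := by
  induction L with
  | nil => rfl
  | cons x rest ih =>
    cases rest with
    | nil => rfl
    | cons y r =>
      simp only [pagesLoopA, tokB]
      rw [ih]
      by_cases h : y - x > 1 <;> simp [h]

-- the inner step of B's fold once the membership test has been discharged
def stepB (st : List String × Int) (p : Int) : List String × Int :=
  (st.1 ++ (if st.1 ≠ [] ∧ p - st.2 > 1 then ["..."] else []) ++ [PySem.Int.toStr p], p)

theorem foldl_stepB_ne (L : List Int) : ∀ (acc : List String) (prev : Int), acc ≠ [] →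
    (L.foldl stepB (acc, prev)).1 = acc ++ tokB prev L := by
  induction L with
  | nil => intro acc prev _; simp [tokB]
  | cons x rest ih =>
    intro acc prev hacc
    simp only [List.foldl_cons, stepB, tokB]
    rw [ih _ x (by simp)]
    by_cases h : x - prev > 1 <;> simp [hacc, h]

theorem foldl_stepB_nil (L : List Int) :
    (L.foldl stepB ([], 0)).1 =
      match L with | [] => [] | x :: rest => PySem.Int.toStr x :: tokB x rest := by
  cases L with
  | nil => rfl
  | cons x rest =>
    simp only [List.foldl_cons, stepB, ne_eq, not_true_eq_false, false_and, if_false,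
      List.nil_append]
    rw [foldl_stepB_ne rest [PySem.Int.toStr x] x (by simp)]
    simp

-- mergeU: membership, sortedness
theorem mem_mergeU (xs ys : List Int) (z : Int) : z ∈ mergeU xs ys ↔ z ∈ xs ∨ z ∈ ys := by
  fun_induction mergeU xs ys with
  | case1 ys => simp
  | case2 x xs => simp
  | case3 x xs y ys h ih => simp [ih]; tauto
  | case4 x xs y ys h h' ih => simp [ih]; tauto
  | case5 x xs y ys h h' ih =>
    have hxy : x = y := by omega
    simp [ih, hxy]; tauto

theorem pairwise_mergeU (xs ys : List Int) (hx : xs.Pairwise (· < ·)) (hy : ys.Pairwise (· < ·)) :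
    (mergeU xs ys).Pairwise (· < ·) := by
  fun_induction mergeU xs ys with
  | case1 ys => simpa using hy
  | case2 x xs => simpa using hx
  | case3 x xs y ys h ih =>
    rw [List.pairwise_cons] at hx ⊢
    refine ⟨?_, ih hx.2 hy⟩
    intro z hz
    rcases (mem_mergeU _ _ z).1 hz with hz | hz
    · exact hx.1 z hz
    · rcases List.mem_cons.1 hz with rfl | hz
      · exact h
      · exact lt_trans h ((List.pairwise_cons.1 hy).1 z hz)
  | case4 x xs y ys h h' ih =>
    rw [List.pairwise_cons] at hy ⊢
    refine ⟨?_, ih hx hy.2⟩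
    intro z hz
    rcases (mem_mergeU _ _ z).1 hz with hz | hz
    · rcases List.mem_cons.1 hz with rfl | hz
      · exact h'
      · exact lt_trans h' ((List.pairwise_cons.1 hx).1 z hz)
    · exact hy.1 z hz
  | case5 x xs y ys h h' ih =>
    have hxy : x = y := by omega
    rw [List.pairwise_cons] at hx hy ⊢
    refine ⟨?_, ih hx.2 hy.2⟩
    intro z hz
    rcases (mem_mergeU _ _ z).1 hz with hz | hz
    · exact hx.1 z hz
    · exact hxy ▸ hy.1 z hz

-- A's sorted(set(start+around+end)) is exactly B's three-way merged list
theorem sortedSet_eq_mergeU (s ar e : List Int)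
    (hs : s.Pairwise (· < ·)) (har : ar.Pairwise (· < ·)) (he : e.Pairwise (· < ·)) :
    PySem.List.sorted (PySem.Set.ofList (s ++ ar ++ e)) (fun x => x) false =
      mergeU (mergeU s ar) e := by
  have hpw : (mergeU (mergeU s ar) e).Pairwise (· < ·) :=
    pairwise_mergeU _ _ (pairwise_mergeU _ _ hs har) he
  apply PySem.List.sorted_eq_of_perm_of_pairwise_lt
  · rw [List.perm_ext_iff_of_nodup (hpw.imp fun h => ne_of_lt h) (PySem.Set.nodup_ofList _)]
    intro z
    simp [mem_mergeU, PySem.Set.mem_ofList]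
    tauto
  · exact hpw

-- ===== VERDICT (by name: the statement is the Claim_ definition above) =====
theorem generate_pagination_spec : Claim_equal_generate_pagination := by
  intro c t b a _
  unfold Spec_generate_pagination generate_pagination generate_pagination_alt
  by_cases hbad : (c < 1 || c > t || t < 1 || b < 0 || a < 0) = true
  · simp [hbad]
  · rw [if_neg hbad, if_neg hbad]
    dsimp only
    rw [sortedSet_eq_mergeU _ _ _ (PySem.List.pairwise_lt_pyRange_one _ _)
      (PySem.List.pairwise_lt_pyRange_one _ _) (PySem.List.pairwise_lt_pyRange_one _ _)]
    rw [show (fun (st : List String × Int) (p : Int) =>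
        (st.1 ++ (if st.1 ≠ [] ∧ p - st.2 > 1 then ["..."] else []) ++ [PySem.Int.toStr p], p)) = stepB
      from rfl]
    rw [foldl_stepB_nil, pagesLoopA_eq_tokB]
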